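-- pv_equiv track=rewrite | github.com/emgeek-gs/test2 | opensfm/pairs_selection.py | match_candidates_by_order
-- ===== SOURCE A (Python) =====
-- def match_candidates_by_order(images, max_neighbors):
--     """Find candidate matching pairs by sequence order."""
--     if max_neighbors <= 0:
--         return set()
--     n = (max_neighbors + 1) // 2
--
--     pairs = set()
--     for i, image in enumerate(images):
--         a = max(0, i - n)
--         b = min(len(images), i + n)
--         for j in range(a, b):
--             if i != j:
--                 pairs.add(tuple(sorted((images[i], images[j]))))
--     return pairs
-- ===== SOURCE B (Python) =====
-- def match_candidates_by_order(images, max_neighbors):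
--     """Find candidate matching pairs by sequence order."""
--     if max_neighbors <= 0:
--         return set()
--     n = (max_neighbors + 1) // 2
--     ahead = images[:n]   # the current image followed by its forward partners
--     window = []          # images already passed; at most the last n, oldest first
--     pairs = set()
--     k = n                # feed position of the look-ahead buffer
--     while ahead:
--         image = ahead.pop(0)
--         if len(window) == n:
--             pairs.add(tuple(sorted((window.pop(0), image))))
--         for other in ahead:
--             pairs.add(tuple(sorted((image, other))))
--         window.append(image)
--         if k < len(images):
--             ahead.append(images[k])
--             k += 1
--     return pairs
-- ===== Notes on version B (the rewrite author's own statement) =====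
-- stated objective: alternative
-- what changed: A recomputes a clamped symmetric index window (max/min bounds, i != j guard) around every position and attempts every pair twice, relying on set dedup; B never computes window bounds: it streams through the list once with a look-ahead buffer and a trailing window buffer that slide by pop/append, inserting each pair exactly once (one look-back pair when the trailing buffer is full, plus the pairs with the buffered forward partners).
import Mathlib
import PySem

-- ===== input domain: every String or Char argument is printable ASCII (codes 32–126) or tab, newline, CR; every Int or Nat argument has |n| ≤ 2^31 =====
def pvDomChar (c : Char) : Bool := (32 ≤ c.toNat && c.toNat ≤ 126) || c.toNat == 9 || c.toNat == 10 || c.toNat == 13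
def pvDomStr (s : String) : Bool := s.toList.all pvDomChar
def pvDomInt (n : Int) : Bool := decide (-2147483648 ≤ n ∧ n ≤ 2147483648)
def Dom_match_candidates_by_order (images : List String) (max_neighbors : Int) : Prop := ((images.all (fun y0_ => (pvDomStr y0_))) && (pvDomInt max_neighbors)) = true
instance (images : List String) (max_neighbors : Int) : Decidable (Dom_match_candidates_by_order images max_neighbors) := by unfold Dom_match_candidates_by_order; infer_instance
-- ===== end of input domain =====

-- B replaces A's index arithmetic (a clamped symmetric window recomputed around every position, each
-- pair attempted twice and deduplicated by the set) with a single buffered stream: a look-ahead buffer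
-- and a trailing window buffer slide along the list and each pair is inserted exactly once; objective:
-- alternative decomposition, same resulting set.

-- ===== PORT A =====
-- shared helper: both Pythons contain the same expression `tuple(sorted((u, v)))`
def pairSorted (x y : String) : String × String :=
  match PySem.List.sorted [x, y] (fun s => s) false with
  | [a, b] => (a, b)
  | _ => (x, y)

def match_candidates_by_order (images : List String) (max_neighbors : Int) : List (String × String) :=
  if max_neighbors ≤ 0 then PySem.Set.empty
  else
    let n := PySem.Int.floordiv (max_neighbors + 1) 2
    (PySem.List.enumerate images).foldl
      (fun pairs iimg =>
        let i := iimg.1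
        let a := max 0 (i - n)
        let b := min (images.length : Int) (i + n)
        (PySem.List.pyRange a b 1).foldl
          (fun pairs j =>
            if i ≠ j then
              PySem.Set.add pairs
                (pairSorted (PySem.List.pyGetD images i "") (PySem.List.pyGetD images j ""))
            else pairs)
          pairs)
      PySem.Set.empty

-- ===== PORT B =====
-- the while loop of Source B: `ahead` is the look-ahead buffer (current image first), `window` the trailing
-- buffer of already-passed images (oldest first), `k` the feed position; `ahead.pop(0)` is the
-- structural head/tail split, `window.pop(0)` is `window.headD ""`/`window.tail` (nonempty when its
-- length equals n ≥ 1).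
def pvAltLoop (images : List String) (n : Int) :
    List String → List String → List (String × String) → Int → List (String × String)
  | [], _window, pairs, _k => pairs
  | image :: rest, window, pairs, k =>
      let pairs1 :=
        if (window.length : Int) = n then
          PySem.Set.add pairs (pairSorted (window.headD "") image)
        else pairs
      let window1 := if (window.length : Int) = n then window.tail else window
      let pairs2 := rest.foldl (fun s other => PySem.Set.add s (pairSorted image other)) pairs1
      let window2 := window1 ++ [image]
      if k < (images.length : Int) then
        pvAltLoop images n (rest ++ [PySem.List.pyGetD images k ""]) window2 pairs2 (k + 1)
      else
        pvAltLoop images n rest window2 pairs2 k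
  termination_by ahead _window _pairs k => (((images.length : Int) - k).toNat, ahead.length)
  decreasing_by
  · apply Prod.Lex.left
    omega
  · apply Prod.Lex.right'
    · omega
    · simp

def match_candidates_by_order_alt (images : List String) (max_neighbors : Int) : List (String × String) :=
  if max_neighbors ≤ 0 then PySem.Set.empty
  else
    let n := PySem.Int.floordiv (max_neighbors + 1) 2
    pvAltLoop images n (PySem.List.slice images none (some n)) [] PySem.Set.empty n

-- ===== PRECONDITION & SPEC =====
def Spec_match_candidates_by_order (images : List String) (max_neighbors : Int) (out : List (String × String)) : Prop := out = match_candidates_by_order_alt images max_neighbors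
instance (images : List String) (max_neighbors : Int) (out : List (String × String)) : Decidable (Spec_match_candidates_by_order images max_neighbors out) := by unfold Spec_match_candidates_by_order; infer_instance

-- ===== CLAIM (what is proved, stated in full; the proofs are below) =====
def Claim_equal_match_candidates_by_order : Prop := ∀ (images : List String) (max_neighbors : Int), Dom_match_candidates_by_order images max_neighbors → Spec_match_candidates_by_order images max_neighbors (match_candidates_by_order images max_neighbors)

-- ===== LEMMAS AND PROOFS =====

theorem pairSorted_comm (x y : String) : pairSorted x y = pairSorted y x := by
  have hs : ∀ a b : String,
      PySem.List.sorted [a, b] (fun s => s) false = if a ≤ b then [a, b] else [b, a] := by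
    intro a b
    by_cases h : a ≤ b
    · rw [if_pos h]
      exact PySem.List.sorted_eq_self_of_pairwise [a, b] (fun s => s)
        (by simp [String.le_iff_toList_le.mp h])
    · rw [if_neg h]
      exact PySem.List.sorted_eq_of_perm_of_pairwise_lt [a, b] [b, a] (fun s => s)
        (List.Perm.swap a b []) (by simp [String.lt_iff_toList_lt.mp (lt_of_not_ge h)])
  by_cases h : x ≤ y <;> by_cases h' : y ≤ x
  · have : x = y := le_antisymm h h'
    subst this; rfl
  · simp [pairSorted, hs, h, h']
  · simp [pairSorted, hs, h, h']
  · exact absurd (le_of_not_ge h) h'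

-- the pair of values inserted for an index pair (i, j)
def pvP (images : List String) (i j : Int) : String × String :=
  pairSorted (PySem.List.pyGetD images i "") (PySem.List.pyGetD images j "")

theorem pvP_comm (images : List String) (i j : Int) : pvP images i j = pvP images j i :=
  pairSorted_comm _ _

-- one iteration of A's outer loop
def pvStepA (images : List String) (n0 : Int) (S : List (String × String)) (i : Int) :
    List (String × String) :=
  (PySem.List.pyRange (max 0 (i - n0)) (min (images.length : Int) (i + n0)) 1).foldl
    (fun pairs j => if i ≠ j then PySem.Set.add pairs (pvP images i j) else pairs) S

-- A's step re-expressed: first the look-back insertion at distance n', then the forward ones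
def pvStepB (images : List String) (n' : Int) (S : List (String × String)) (i : Int) :
    List (String × String) :=
  (PySem.List.pyRange 1 n' 1).foldl
    (fun pairs d =>
      if i + d < (images.length : Int) then PySem.Set.add pairs (pvP images i (i + d)) else pairs)
    (if n' ≤ i then PySem.Set.add S (pvP images (i - n') i) else S)

-- generic facts about folds of guarded set insertions
theorem pv_fold_mono {P : Int → Prop} [DecidablePred P] (f : Int → String × String)
    (l : List Int) {x : String × String} :
    ∀ S : List (String × String), x ∈ S →
      x ∈ l.foldl (fun s j => if P j then PySem.Set.add s (f j) else s) S := by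
  induction l with
  | nil => intro S hx; exact hx
  | cons a t ih =>
      intro S hx
      simp only [List.foldl_cons]
      split_ifs with h
      · exact ih _ ((PySem.Set.mem_add _ _ _).mpr (Or.inl hx))
      · exact ih _ hx

theorem pv_fold_of_mem {P : Int → Prop} [DecidablePred P] (f : Int → String × String)
    (l : List Int) {j : Int} (hj : j ∈ l) (hP : P j) :
    ∀ S : List (String × String),
      f j ∈ l.foldl (fun s j => if P j then PySem.Set.add s (f j) else s) S := by
  induction l with
  | nil => cases hj
  | cons a t ih =>
      intro S
      simp only [List.foldl_cons]
      rcases List.mem_cons.mp hj with rfl | hj'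
      · rw [if_pos hP]
        exact pv_fold_mono f t _ ((PySem.Set.mem_add _ _ _).mpr (Or.inr rfl))
      · exact ih hj' _

theorem pv_fold_noop {P : Int → Prop} [DecidablePred P] (f : Int → String × String)
    (l : List Int) (S : List (String × String)) (h : ∀ j ∈ l, P j → f j ∈ S) :
    l.foldl (fun s j => if P j then PySem.Set.add s (f j) else s) S = S := by
  induction l with
  | nil => rfl
  | cons a t ih =>
      simp only [List.foldl_cons]
      have hstep : (if P a then PySem.Set.add S (f a) else S) = S := by
        split_ifs with hPa
        · have : f a ∈ S := h a (List.mem_cons_self ..) hPa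
          simp [PySem.Set.add, PySem.Set.contains, this]
        · rfl
      rw [hstep]
      exact ih (fun j hj => h j (List.mem_cons_of_mem _ hj))

theorem pv_fold_shift (g : List (String × String) → Int → List (String × String)) (t a b : Int)
    (S : List (String × String)) :
    (PySem.List.pyRange (t + a) (t + b) 1).foldl g S
      = (PySem.List.pyRange a b 1).foldl (fun s d => g s (t + d)) S := by
  rw [PySem.List.pyRange_one, PySem.List.pyRange_one]
  have hd : t + b - (t + a) = b - a := by ring
  rw [hd, List.foldl_map, List.foldl_map]
  apply PySem.List.foldl_congr_mem
  intro acc x _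
  congr 1
  ring

-- invariant: all forward pairs of distance < n' with left index below the frontier are present
def pvInv (images : List String) (n' i : Int) (S : List (String × String)) : Prop :=
  ∀ p d : Int, 0 ≤ p → 1 ≤ d → d < n' → p + d < (images.length : Int) → p < i →
    pvP images p (p + d) ∈ S

theorem pv_stepEq (images : List String) (n0 : Int) (hn0 : 1 ≤ n0) (i : Int)
    (S : List (String × String)) (h0 : 0 ≤ i) (him : i < (images.length : Int))
    (hInv : pvInv images (min n0 (images.length : Int)) i S) :
    pvStepA images n0 S i = pvStepB images (min n0 (images.length : Int)) S i := by
  set m := (images.length : Int) with hm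
  set n' := min n0 m with hn'
  set c := min n' (m - i) with hc
  have hb : min m (i + n0) = i + c := by omega
  unfold pvStepA
  rw [PySem.List.pyRange_one_append (max 0 (i - n0)) i (min m (i + n0)) (by omega) (by omega)]
  rw [PySem.List.pyRange_one_cons (show i < min m (i + n0) by omega)]
  rw [hb, List.foldl_append, List.foldl_cons]
  have hback : (PySem.List.pyRange (max 0 (i - n0)) i 1).foldl
      (fun s j => if i ≠ j then PySem.Set.add s (pvP images i j) else s) S
      = (if n' ≤ i then PySem.Set.add S (pvP images (i - n') i) else S) := by
    by_cases hni : n0 ≤ i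
    · have ha : max 0 (i - n0) = i - n0 := by omega
      rw [ha, PySem.List.pyRange_one_cons (by omega), List.foldl_cons,
        if_pos (show i ≠ i - n0 by omega), pvP_comm images i (i - n0), if_pos (show n' ≤ i by omega),
        (show i - n' = i - n0 by omega)]
      apply pv_fold_noop
      intro j hj _
      have hjr := PySem.List.mem_pyRange_one.mp hj
      have hmem := hInv j (i - j) (by omega) (by omega) (by omega) (by omega) (by omega)
      rw [show j + (i - j) = i by omega] at hmem
      rw [pvP_comm images i j]
      exact (PySem.Set.mem_add _ _ _).mpr (Or.inl hmem)
    · have ha : max 0 (i - n0) = 0 := by omega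
      rw [ha, if_neg (show ¬ n' ≤ i by omega)]
      apply pv_fold_noop
      intro j hj _
      have hjr := PySem.List.mem_pyRange_one.mp hj
      have hmem := hInv j (i - j) (by omega) (by omega) (by omega) (by omega) (by omega)
      rw [show j + (i - j) = i by omega] at hmem
      rw [pvP_comm images i j]
      exact hmem
  rw [hback, if_neg (show ¬ i ≠ i by simp)]
  unfold pvStepB
  rw [pv_fold_shift (fun s j => if i ≠ j then PySem.Set.add s (pvP images i j) else s) i 1 c]
  rw [PySem.List.pyRange_one_append 1 c n' (by omega) (by omega), List.foldl_append]
  rw [pv_fold_noop (fun d => pvP images i (i + d)) (PySem.List.pyRange c n' 1) _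
    (by
      intro d hd hcond
      have hdr := PySem.List.mem_pyRange_one.mp hd
      exact absurd hcond (by omega))]
  apply PySem.List.foldl_congr_mem
  intro acc d hd
  have hdr := PySem.List.mem_pyRange_one.mp hd
  rw [if_pos (show i ≠ i + d by omega), if_pos (show i + d < m by omega)]

theorem pv_invStep (images : List String) (n0 : Int) (i : Int)
    (S : List (String × String)) (him : i < (images.length : Int))
    (hInv : pvInv images (min n0 (images.length : Int)) i S) :
    pvInv images (min n0 (images.length : Int)) (i + 1)
      (pvStepB images (min n0 (images.length : Int)) S i) := by
  intro p d hp hd hdn hpd hpi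
  unfold pvStepB
  by_cases hpe : p = i
  · subst hpe
    exact pv_fold_of_mem (P := fun d => p + d < (images.length : Int))
      (f := fun d => pvP images p (p + d)) _
      (PySem.List.mem_pyRange_one.mpr ⟨hd, hdn⟩) hpd _
  · have hlt : p < i := by omega
    apply pv_fold_mono
    have hmem := hInv p d hp hd hdn hpd hlt
    split_ifs with h
    · exact (PySem.Set.mem_add _ _ _).mpr (Or.inl hmem)
    · exact hmem

theorem pv_main (images : List String) (n0 : Int) (hn0 : 1 ≤ n0) (k : Nat) :
    ∀ (i : Int) (S : List (String × String)),
      0 ≤ i → i ≤ (images.length : Int) → ((images.length : Int) - i).toNat = k →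
      pvInv images (min n0 (images.length : Int)) i S →
      (PySem.List.pyRange i (images.length : Int) 1).foldl (pvStepA images n0) S
        = (PySem.List.pyRange i (images.length : Int) 1).foldl
            (pvStepB images (min n0 (images.length : Int))) S := by
  induction k with
  | zero =>
      intro i S h0 hm hk _
      rw [PySem.List.pyRange_one_eq_nil (by omega)]
      rfl
  | succ k ih =>
      intro i S h0 hm hk hInv
      have him : i < (images.length : Int) := by omega
      rw [PySem.List.pyRange_one_cons him, List.foldl_cons, List.foldl_cons,
        pv_stepEq images n0 hn0 i S h0 him hInv]
      exact ih (i + 1) _ (by omega) (by omega) (by omega)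
        (pv_invStep images n0 i S him hInv)

-- reading a pyRange of indices through the list: the corresponding contiguous sublist
def pvGet (images : List String) (j : Int) : String := PySem.List.pyGetD images j ""

theorem pv_map_get (images : List String) (b : Int) (hb : b ≤ (images.length : Int)) (k : Nat) :
    ∀ a : Int, 0 ≤ a → (b - a).toNat = k →
      (PySem.List.pyRange a b 1).map (pvGet images) = (images.drop a.toNat).take k := by
  induction k with
  | zero =>
      intro a _ hk
      rw [PySem.List.pyRange_one_eq_nil (by omega)]
      simp
  | succ k ih =>
      intro a ha hk
      have hab : a < b := by omega
      have haL : a.toNat < images.length := by omega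
      rw [PySem.List.pyRange_one_cons hab, List.map_cons, ih (a + 1) (by omega) (by omega),
        List.drop_eq_getElem_cons haL, List.take_succ_cons,
        show (a + 1).toNat = a.toNat + 1 from by omega]
      congr 1
      unfold pvGet
      rw [PySem.List.pyGetD_eq_getElem images "" ha (by omega)]

-- one iteration of B's buffered stream equals one application of pvStepB (with the buffers advanced)
theorem pv_alt_step (images : List String) (n : Int) (hn : 1 ≤ n) (i : Int)
    (S : List (String × String)) (h0 : 0 ≤ i) (him : i < (images.length : Int)) :
    pvAltLoop images n
      ((PySem.List.pyRange i (min (i + n) (images.length : Int)) 1).map (pvGet images))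
      ((PySem.List.pyRange (max 0 (i - n)) i 1).map (pvGet images))
      S (max n (min (i + n) (images.length : Int)))
    = pvAltLoop images n
        ((PySem.List.pyRange (i + 1) (min (i + 1 + n) (images.length : Int)) 1).map (pvGet images))
        ((PySem.List.pyRange (max 0 (i + 1 - n)) (i + 1) 1).map (pvGet images))
        (pvStepB images (min n (images.length : Int)) S i)
        (max n (min (i + 1 + n) (images.length : Int))) := by
  set m := (images.length : Int) with hm
  set b := min (i + n) m with hbdef
  have hib : i < b := by omega
  rw [PySem.List.pyRange_one_cons hib, List.map_cons]
  simp only [pvAltLoop]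
  -- window length condition
  have hwl : (((PySem.List.pyRange (max 0 (i - n)) i 1).map (pvGet images)).length : Int)
      = i - max 0 (i - n) := by
    rw [List.length_map, PySem.List.length_pyRange_one]
    omega
  have hwcond : ((((PySem.List.pyRange (max 0 (i - n)) i 1).map (pvGet images)).length : Int) = n)
      ↔ n ≤ i := by
    rw [hwl]; omega
  -- the inserted pairs of one iteration equal pvStepB
  have hpairs :
      ((PySem.List.pyRange (i + 1) b 1).map (pvGet images)).foldl
        (fun s other => PySem.Set.add s (pairSorted (pvGet images i) other))
        (if (((PySem.List.pyRange (max 0 (i - n)) i 1).map (pvGet images)).length : Int) = n then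
          PySem.Set.add S
            (pairSorted (((PySem.List.pyRange (max 0 (i - n)) i 1).map (pvGet images)).headD "")
              (pvGet images i))
        else S)
      = pvStepB images (min n m) S i := by
    have hseed :
        (if (((PySem.List.pyRange (max 0 (i - n)) i 1).map (pvGet images)).length : Int) = n then
          PySem.Set.add S
            (pairSorted (((PySem.List.pyRange (max 0 (i - n)) i 1).map (pvGet images)).headD "")
              (pvGet images i))
        else S)
        = (if min n m ≤ i then PySem.Set.add S (pvP images (i - min n m) i) else S) := by
      by_cases hni : n ≤ i
      · rw [if_pos (hwcond.mpr hni), if_pos (show min n m ≤ i by omega)]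
        have hmx : max 0 (i - n) = i - n := by omega
        rw [hmx, PySem.List.pyRange_one_cons (show i - n < i by omega), List.map_cons,
          List.headD_cons, show i - min n m = i - n by omega]
        rfl
      · rw [if_neg (fun h => hni (hwcond.mp h)), if_neg (show ¬ min n m ≤ i by omega)]
    rw [hseed]
    unfold pvStepB
    rw [List.foldl_map]
    rw [show PySem.List.pyRange (i + 1) b 1
        = PySem.List.pyRange (i + 1) (i + (b - i)) 1 by congr 1; omega]
    rw [pv_fold_shift
      (fun x y => (fun s other => PySem.Set.add s (pairSorted (pvGet images i) other)) x
        (pvGet images y)) i 1 (b - i)]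
    rw [PySem.List.pyRange_one_append 1 (b - i) (min n m) (by omega) (by omega), List.foldl_append]
    rw [pv_fold_noop (fun d => pvP images i (i + d)) (PySem.List.pyRange (b - i) (min n m) 1) _
      (by
        intro j hj hcond
        have hjr := PySem.List.mem_pyRange_one.mp hj
        exact absurd hcond (by omega))]
    apply PySem.List.foldl_congr_mem
    intro acc d hd
    have hdr := PySem.List.mem_pyRange_one.mp hd
    rw [if_pos (show i + d < m by omega)]
    rfl
  -- window after the iteration
  have hwin :
      ((if (((PySem.List.pyRange (max 0 (i - n)) i 1).map (pvGet images)).length : Int) = n then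
          ((PySem.List.pyRange (max 0 (i - n)) i 1).map (pvGet images)).tail
        else ((PySem.List.pyRange (max 0 (i - n)) i 1).map (pvGet images)))
        ++ [pvGet images i])
      = (PySem.List.pyRange (max 0 (i + 1 - n)) (i + 1) 1).map (pvGet images) := by
    by_cases hni : n ≤ i
    · rw [if_pos (hwcond.mpr hni)]
      have hmx : max 0 (i - n) = i - n := by omega
      rw [hmx, PySem.List.pyRange_one_cons (show i - n < i by omega), List.map_cons, List.tail_cons,
        show max 0 (i + 1 - n) = (i - n + 1) by omega,
        PySem.List.pyRange_one_succ_right (show i - n + 1 ≤ i by omega), List.map_append]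
      rfl
    · rw [if_neg (fun h => hni (hwcond.mp h))]
      have hmx : max 0 (i - n) = 0 := by omega
      have hmx' : max 0 (i + 1 - n) = 0 := by omega
      rw [hmx, hmx', PySem.List.pyRange_one_succ_right (show (0:Int) ≤ i by omega), List.map_append]
      rfl
  by_cases hfeed : i + n < m
  · have hk : max n b < m := by omega
    have hkval : max n b = i + n := by omega
    rw [if_pos hk, hwin, hpairs, hkval]
    have hrest : (PySem.List.pyRange (i + 1) b 1).map (pvGet images)
        ++ [PySem.List.pyGetD images (i + n) ""]
        = (PySem.List.pyRange (i + 1) (min (i + 1 + n) m) 1).map (pvGet images) := by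
      rw [show b = i + n from by omega, show min (i + 1 + n) m = (i + n) + 1 from by omega,
        PySem.List.pyRange_one_succ_right (show i + 1 ≤ i + n by omega), List.map_append]
      rfl
    rw [hrest, show i + n + 1 = max n (min (i + 1 + n) m) from by omega]
  · have hk : ¬ max n b < m := by omega
    rw [if_neg hk, hwin, hpairs,
      show b = min (i + 1 + n) m from by omega]

theorem pv_alt_main (images : List String) (n : Int) (hn : 1 ≤ n) (cnt : Nat) :
    ∀ (i : Int) (S : List (String × String)),
      0 ≤ i → i ≤ (images.length : Int) → ((images.length : Int) - i).toNat = cnt →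
      pvAltLoop images n
        ((PySem.List.pyRange i (min (i + n) (images.length : Int)) 1).map (pvGet images))
        ((PySem.List.pyRange (max 0 (i - n)) i 1).map (pvGet images))
        S (max n (min (i + n) (images.length : Int)))
      = (PySem.List.pyRange i (images.length : Int) 1).foldl
          (pvStepB images (min n (images.length : Int))) S := by
  induction cnt with
  | zero =>
      intro i S h0 hm hk
      have hi : i = (images.length : Int) := by omega
      rw [show min (i + n) (images.length : Int) = i from by omega,
        PySem.List.pyRange_one_eq_nil (le_refl i), List.map_nil,
        PySem.List.pyRange_one_eq_nil (show (images.length : Int) ≤ i from by omega),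
        List.foldl_nil]
      simp only [pvAltLoop]
  | succ cnt ih =>
      intro i S h0 hm hk
      have him : i < (images.length : Int) := by omega
      rw [pv_alt_step images n hn i S h0 him,
        PySem.List.pyRange_one_cons him, List.foldl_cons]
      exact ih (i + 1) _ (by omega) (by omega) (by omega)

-- ===== VERDICT (by name: the statement is the Claim_ definition above) =====
theorem match_candidates_by_order_spec : Claim_equal_match_candidates_by_order := by
  intro images mn _
  show match_candidates_by_order images mn = match_candidates_by_order_alt images mn
  unfold match_candidates_by_order match_candidates_by_order_alt
  by_cases h : mn ≤ 0
  · simp [h]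
  · rw [if_neg h, if_neg h]
    set m := (images.length : Int) with hm
    set n := PySem.Int.floordiv (mn + 1) 2 with hn
    have hn0 : 1 ≤ n := by
      rw [hn, PySem.Int.le_floordiv_iff_mul_le (by omega)]
      omega
    have hA : (PySem.List.enumerate images).foldl
        (fun pairs iimg => pvStepA images n pairs iimg.1) PySem.Set.empty
        = (PySem.List.pyRange 0 m 1).foldl (pvStepA images n) PySem.Set.empty := by
      have hmf := PySem.List.map_fst_enumerate images 0
      rw [zero_add] at hmf
      rw [← hmf, List.foldl_map]
    have hslice : PySem.List.slice images none (some n)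
        = (PySem.List.pyRange 0 (min (0 + n) m) 1).map (pvGet images) := by
      rw [PySem.List.slice_to images (by omega),
        pv_map_get images (min (0 + n) m) (by omega) (min (0 + n) m).toNat 0 (by omega) (by omega),
        show Int.toNat 0 = 0 from rfl, List.drop_zero]
      by_cases hnm : n ≤ m
      · rw [show (min (0 + n) m).toNat = n.toNat from by omega]
      · rw [List.take_of_length_le (by omega), List.take_of_length_le (by omega)]
    have hB : pvAltLoop images n (PySem.List.slice images none (some n)) [] PySem.Set.empty n
        = (PySem.List.pyRange 0 m 1).foldl (pvStepB images (min n m)) PySem.Set.empty := by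
      have H := pv_alt_main images n hn0 (m - 0).toNat 0 PySem.Set.empty
        (by omega) (by omega) rfl
      rw [show max 0 (0 - n) = 0 from by omega, PySem.List.pyRange_one_eq_nil (le_refl (0 : Int)),
        List.map_nil, show max n (min (0 + n) m) = n from by omega] at H
      rw [hslice]
      exact H
    show (PySem.List.enumerate images).foldl
        (fun pairs iimg => pvStepA images n pairs iimg.1) PySem.Set.empty
      = pvAltLoop images n (PySem.List.slice images none (some n)) [] PySem.Set.empty n
    rw [hA, hB]
    exact pv_main images n hn0 (m - 0).toNat 0 PySem.Set.empty (by omega) (by omega) rfl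
      (by intro p d hp _ _ _ hlt; exact absurd hlt (by omega))
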